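-- pv_equiv track=rewrite | github.com/lancelote/codechef_2017 | solutions/snake_eating.py | number_of_snakes
-- ===== SOURCE A (Python) =====
-- def number_of_snakes(limit, snakes):
--     """Count number of snakes after eating >= limit."""
--     total = 0
--     snakes = sorted(snakes)
--
--     while snakes:
--         snake = snakes.pop()
--         while snake < limit and snakes:
--             snakes.pop()
--             snake += 1
--         if limit - snake > len(snakes):
--             break
--         total += 1
--     return total
-- ===== SOURCE B (Python) =====
-- def number_of_snakes(limit, snakes):
--     """Count number of snakes after eating >= limit."""
--     arr = sorted(snakes, reverse=True)
--     n = len(arr)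
--     total = 0
--     i = 0
--     while i < n:
--         need = max(0, limit - arr[i])
--         if i + need < n:
--             total += 1
--             i += need + 1
--         else:
--             break
--     return total
-- ===== Notes on version B (the rewrite author's own statement) =====
-- stated objective: alternative
-- what changed: B replaces A's destructive pop-based loops (pop the grower off an ascending sorted list, then an inner one-snake-at-a-time eating loop) with a single index pass over the descending-sorted list that computes each grower's food requirement need = max(0, limit - arr[i]) and jumps the pointer over it arithmetically.
import Mathlib
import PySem

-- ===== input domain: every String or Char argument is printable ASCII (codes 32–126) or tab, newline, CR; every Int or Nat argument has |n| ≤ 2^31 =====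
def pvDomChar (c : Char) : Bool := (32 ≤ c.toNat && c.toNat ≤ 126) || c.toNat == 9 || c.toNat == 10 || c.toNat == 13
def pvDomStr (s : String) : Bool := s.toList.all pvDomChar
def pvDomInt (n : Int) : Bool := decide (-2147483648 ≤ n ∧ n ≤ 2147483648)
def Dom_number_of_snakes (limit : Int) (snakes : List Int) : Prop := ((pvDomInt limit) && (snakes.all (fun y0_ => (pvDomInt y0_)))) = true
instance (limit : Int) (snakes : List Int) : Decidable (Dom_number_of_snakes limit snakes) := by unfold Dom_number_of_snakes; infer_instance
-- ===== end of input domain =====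

-- B replaces A's pop-based mutation loops (grower pops the largest, then an inner one-by-one
-- eating loop) by a single forward pass over the descending-sorted list that jumps over each
-- grower's food arithmetically; objective: alternative decomposition, same asymptotic cost.

-- ===== PORT A =====
-- length fact the ports' termination arguments cite
theorem pvDropLast_lt {s : List Int} (h : s ≠ []) : s.dropLast.length < s.length := by
  have : 0 < s.length := List.length_pos_of_ne_nil h
  simp only [List.length_dropLast]; omega

-- inner while loop: `while snake < limit and snakes: snakes.pop(); snake += 1`
-- (pop() removes the LAST element of the ascending list = dropLast)
def pvEatA (limit snake : Int) (s : List Int) : Int × List Int :=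
  if h : snake < limit ∧ s ≠ [] then
    pvEatA limit (snake + 1) s.dropLast
  else (snake, s)
termination_by s.length
decreasing_by exact pvDropLast_lt h.2

-- the inner loop never lengthens the list (needed for the outer loop's termination)
theorem pvEatA_length_le (limit : Int) : ∀ (n : Nat) (s : List Int), s.length ≤ n →
    ∀ (snake : Int), (pvEatA limit snake s).2.length ≤ s.length := by
  intro n
  induction n with
  | zero =>
    intro s hs snake
    rw [pvEatA]
    split
    · next h => exact absurd (List.length_pos_of_ne_nil h.2) (by omega)
    · exact le_refl _
  | succ n ih =>
    intro s hs snake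
    rw [pvEatA]
    split
    · next h =>
      have hlt : s.dropLast.length < s.length := pvDropLast_lt h.2
      exact le_trans (ih s.dropLast (by omega) (snake + 1)) hlt.le
    · exact le_refl _

-- outer while loop: pop the last element as the grower, run the inner loop, test the break
def pvLoopA (limit : Int) (s : List Int) (total : Int) : Int :=
  if h : s = [] then total
  else
    let snake := s.getLast h
    let r := pvEatA limit snake s.dropLast
    if limit - r.1 > (r.2.length : Int) then total
    else pvLoopA limit r.2 (total + 1)
termination_by s.length
decreasing_by
  exact lt_of_le_of_lt (pvEatA_length_le limit s.dropLast.length s.dropLast (le_refl _) (s.getLast h))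
    (pvDropLast_lt h)

def number_of_snakes (limit : Int) (snakes : List Int) : Int :=
  pvLoopA limit (PySem.List.sorted snakes (fun x => x) false) 0

-- ===== PORT B =====
-- while i < n: need = max(0, limit - arr[i]);
--              if i + need < n: total += 1; i += need + 1 else: break
-- (i starts at 0 and only grows, so a Nat index is exact; arr[i] is in range by h)
def pvLoopB (limit : Int) (arr : List Int) (i : Nat) (total : Int) : Int :=
  if h : i < arr.length then
    let need := max 0 (limit - arr[i])
    if (i : Int) + need < (arr.length : Int) then pvLoopB limit arr (i + need.toNat + 1) (total + 1)
    else total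
  else total
termination_by arr.length - i
decreasing_by omega

def number_of_snakes_alt (limit : Int) (snakes : List Int) : Int :=
  pvLoopB limit (PySem.List.sorted snakes (fun x => x) true) 0 0

-- ===== PRECONDITION & SPEC =====
def Spec_number_of_snakes (limit : Int) (snakes : List Int) (out : Int) : Prop := out = number_of_snakes_alt limit snakes
instance (limit : Int) (snakes : List Int) (out : Int) : Decidable (Spec_number_of_snakes limit snakes out) := by unfold Spec_number_of_snakes; infer_instance

-- ===== CLAIM (what is proved, stated in full; the proofs are below) =====
def Claim_equal_number_of_snakes : Prop := ∀ (limit : Int) (snakes : List Int), Dom_number_of_snakes limit snakes → Spec_number_of_snakes limit snakes (number_of_snakes limit snakes)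

-- ===== LEMMAS AND PROOFS =====

-- closed form of the inner eating loop: it eats min(need, len) snakes off the tail
theorem pvEatA_eq (limit : Int) : ∀ (n : Nat) (s : List Int), s.length ≤ n → ∀ (snake : Int),
    pvEatA limit snake s =
      if snake < limit then
        if (limit - snake).toNat ≤ s.length
        then (limit, s.take (s.length - (limit - snake).toNat))
        else (snake + (s.length : Int), [])
      else (snake, s) := by
  intro n
  induction n with
  | zero =>
    intro s hs snake
    have hnil : s = [] := List.length_eq_zero_iff.mp (by omega)
    subst hnil
    rw [pvEatA]
    simp only [ne_eq, not_true_eq_false, and_false, dite_false]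
    split
    · next hlt =>
      have : ¬ (limit - snake).toNat ≤ 0 := by omega
      simp [this]
    · rfl
  | succ n ih =>
    intro s hs snake
    rw [pvEatA]
    split
    · next h =>
      obtain ⟨hlt, hne⟩ := h
      have hpos : 0 < s.length := List.length_pos_of_ne_nil hne
      rw [ih s.dropLast (by rw [List.length_dropLast]; omega) (snake + 1)]
      rw [List.dropLast_eq_take]
      have hlen : (s.take (s.length - 1)).length = s.length - 1 := by
        simp only [List.length_take]; omega
      rw [hlen]
      simp only [if_pos hlt]
      by_cases h2 : snake + 1 < limit
      · simp only [if_pos h2]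
        by_cases h3 : (limit - snake).toNat ≤ s.length
        · rw [if_pos (show (limit - (snake + 1)).toNat ≤ s.length - 1 by omega), if_pos h3,
            List.take_take]
          congr 2
          omega
        · rw [if_neg (show ¬ (limit - (snake + 1)).toNat ≤ s.length - 1 by omega), if_neg h3]
          simp only [Prod.mk.injEq, and_true]
          omega
      · simp only [if_neg h2, if_pos (show (limit - snake).toNat ≤ s.length by omega)]
        simp only [Prod.mk.injEq]
        refine ⟨by omega, ?_⟩
        congr 1
        omega
    · next h =>
      by_cases hlt : snake < limit
      · have hnil : s = [] := by tauto
        subst hnil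
        simp [hlt]
      · simp [hlt]

-- proof-side reformulation of B's pointer walk: the walk over arr from index i is a
-- structural walk over arr.drop i
def pvLoopBd (limit : Int) (rest : List Int) (total : Int) : Int :=
  match rest with
  | [] => total
  | x :: tail =>
    let need := max 0 (limit - x)
    if need ≤ (tail.length : Int) then pvLoopBd limit (tail.drop need.toNat) (total + 1)
    else total
termination_by rest.length
decreasing_by exact lt_of_le_of_lt (by simp) (Nat.lt_succ_self _)

theorem pvLoopB_eq_drop (limit : Int) : ∀ (n : Nat) (arr : List Int) (i : Nat),
    arr.length - i ≤ n → ∀ (t : Int),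
    pvLoopB limit arr i t = pvLoopBd limit (arr.drop i) t := by
  intro n
  induction n with
  | zero =>
    intro arr i hi t
    rw [pvLoopB, dif_neg (by omega), List.drop_eq_nil_of_le (by omega), pvLoopBd]
  | succ n ih =>
    intro arr i hi t
    rw [pvLoopB]
    split
    · next h =>
      have hd : arr.drop i = arr[i] :: arr.drop (i + 1) := List.drop_eq_getElem_cons h
      rw [hd, pvLoopBd]
      dsimp only
      have hlen : (arr.drop (i + 1)).length = arr.length - (i + 1) := List.length_drop
      by_cases hc : (i : Int) + max 0 (limit - arr[i]) < (arr.length : Int)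
      · rw [if_pos hc, if_pos (by rw [hlen]; omega)]
        rw [List.drop_drop]
        rw [ih arr (i + (max 0 (limit - arr[i])).toNat + 1) (by omega) (t + 1)]
        congr 2
        omega
      · rw [if_neg hc, if_neg (by rw [hlen]; omega)]
    · next h =>
      rw [List.drop_eq_nil_of_le (by omega), pvLoopBd]

-- the two loops agree on ANY list: A's pop-from-the-end walk of `l` is B's
-- front-to-back pointer walk of `l.reverse` (the eaten values themselves never matter)
theorem pvLoop_eq (limit : Int) : ∀ (n : Nat) (l : List Int), l.length ≤ n → ∀ (t : Int),
    pvLoopA limit l t = pvLoopBd limit l.reverse t := by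
  intro n
  induction n with
  | zero =>
    intro l hl t
    have : l = [] := List.length_eq_zero_iff.mp (by omega)
    subst this
    simp [pvLoopA, pvLoopBd]
  | succ n ih =>
    intro l hl t
    rw [pvLoopA]
    split
    · next h => subst h; simp [pvLoopBd]
    · next h =>
      have hrev : l.reverse = l.getLast h :: l.dropLast.reverse := by
        conv_lhs => rw [← List.dropLast_append_getLast h]
        simp
      rw [hrev, pvLoopBd]
      set snake := l.getLast h with hsn
      set s := l.dropLast with hsd
      dsimp only
      have hsl : s.length < l.length := pvDropLast_lt h
      rw [pvEatA_eq limit s.length s (le_refl _) snake]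
      simp only [List.length_reverse]
      by_cases hlt : snake < limit
      · have hmax : max 0 (limit - snake) = limit - snake := by omega
        by_cases h3 : (limit - snake).toNat ≤ s.length
        · simp only [if_pos hlt, if_pos h3, hmax]
          rw [if_neg (show ¬ limit - limit > ((s.take (s.length - (limit - snake).toNat)).length : Int) by
            simp only [List.length_take]; omega)]
          rw [if_pos (show limit - snake ≤ (s.length : Int) by omega)]
          rw [List.drop_reverse]
          exact ih _ (by simp only [List.length_take]; omega) (t + 1)
        · simp only [if_pos hlt, if_neg h3, hmax]
          rw [if_pos (show limit - (snake + (s.length : Int)) > (([] : List Int).length : Int) by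
            simp only [List.length_nil]; omega)]
          rw [if_neg (show ¬ limit - snake ≤ (s.length : Int) by omega)]
      · have hmax : max 0 (limit - snake) = 0 := by omega
        simp only [if_neg hlt, hmax]
        rw [if_neg (show ¬ limit - snake > (s.length : Int) by omega)]
        rw [if_pos (show (0:Int) ≤ (s.length : Int) by positivity)]
        simpa using ih s (by omega) (t + 1)

-- sorted(xs, reverse=True) on Ints is the reverse of sorted(xs): both are descending
-- permutations of xs, and those are unique (equal elements are indistinguishable Ints)
theorem sorted_rev_eq (snakes : List Int) :
    PySem.List.sorted snakes (fun x => x) true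
      = (PySem.List.sorted snakes (fun x => x) false).reverse := by
  have h1 := PySem.List.sorted_perm snakes (fun x : Int => x) true
  have h2 := (PySem.List.sorted_perm snakes (fun x : Int => x) false)
  have hp : (PySem.List.sorted snakes (fun x : Int => x) true).Perm ((PySem.List.sorted snakes (fun x : Int => x) false).reverse) :=
    h1.trans (h2.symm.trans (List.reverse_perm _).symm)
  refine List.Perm.eq_of_pairwise (le := fun a b : Int => b ≤ a)
    (fun a b _ _ h1 h2 => le_antisymm h2 h1)
    (by simpa using PySem.List.sorted_pairwise_rev snakes (fun x : Int => x))
    ((List.pairwise_reverse).mpr (by simpa using PySem.List.sorted_pairwise snakes (fun x : Int => x))) hp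

-- ===== VERDICT (by name: the statement is the Claim_ definition above) =====
theorem number_of_snakes_spec : Claim_equal_number_of_snakes := by
  intro limit snakes _
  unfold Spec_number_of_snakes number_of_snakes number_of_snakes_alt
  rw [sorted_rev_eq,
    pvLoopB_eq_drop limit (PySem.List.sorted snakes (fun x => x) false).reverse.length _ 0
      (by omega) 0,
    List.drop_zero]
  exact pvLoop_eq limit _ _ (le_refl _) 0
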